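-- pv_equiv track=rewrite | github.com/max-ksoll/FuXiClimatePrediction | src/utils.py | get_years_as_strings
-- ===== SOURCE A (Python) =====
-- import copy
-- from typing import Set, List, Tuple, Callable, Dict, Any
--
-- def get_years_as_strings(
--     start_year: int, end_year: int, wrap_n_elements_in_array=-1
-- ) -> List[List[str]]:
--     if wrap_n_elements_in_array > 0:
--         res = []
--         tmp = []
--         for year_idx, year in enumerate(range(start_year, end_year + 1)):
--             if not year_idx % wrap_n_elements_in_array and len(tmp) > 0:
--                 res.append(copy.copy(tmp))
--                 tmp.clear()
--             tmp.append(str(year))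
--         if len(tmp) > 0:
--             res.append(copy.copy(tmp))
--         return res
--     return [[str(year) for year in range(start_year, end_year + 1)]]
-- ===== SOURCE B (Python) =====
-- def get_years_as_strings(start_year, end_year, wrap_n_elements_in_array=-1):
--     years = [str(y) for y in range(start_year, end_year + 1)]
--     if wrap_n_elements_in_array <= 0:
--         return [years]
--     w = wrap_n_elements_in_array
--     return [years[i:i + w] for i in range(0, len(years), w)]
-- ===== Notes on version B (the rewrite author's own statement) =====
-- stated objective: simpler
-- what changed: Replaces A's stateful enumerate/modulo accumulator with copy-and-clear flushing by building the full year list once and partitioning it with a stride-w slice comprehension.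
import Mathlib
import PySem

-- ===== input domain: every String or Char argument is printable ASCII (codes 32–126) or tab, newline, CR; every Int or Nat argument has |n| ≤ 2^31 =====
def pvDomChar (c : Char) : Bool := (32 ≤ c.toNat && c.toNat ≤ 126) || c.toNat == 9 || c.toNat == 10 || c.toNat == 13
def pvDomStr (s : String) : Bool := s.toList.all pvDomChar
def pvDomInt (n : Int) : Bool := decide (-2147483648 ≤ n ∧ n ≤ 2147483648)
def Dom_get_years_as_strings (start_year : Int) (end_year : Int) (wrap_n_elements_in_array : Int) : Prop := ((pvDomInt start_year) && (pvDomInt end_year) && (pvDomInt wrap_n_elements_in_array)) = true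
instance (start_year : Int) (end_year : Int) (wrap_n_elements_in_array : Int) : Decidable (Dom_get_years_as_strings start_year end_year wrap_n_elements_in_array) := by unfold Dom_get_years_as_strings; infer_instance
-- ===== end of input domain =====

-- B replaces A's stateful modulo-gated accumulator chunking with a build-then-slice partition (simpler decomposition, same cost).

-- ===== PORT A =====
-- one iteration of A's for-loop over enumerate(range(start_year, end_year+1))
def pvStepA (w : Int) (st : List (List String) × List String) (p : Int × Int) : List (List String) × List String :=
  let st' := if PySem.Int.mod p.1 w = 0 ∧ 0 < st.2.length then (st.1 ++ [st.2], ([] : List String)) else st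
  (st'.1, st'.2 ++ [PySem.Int.toStr p.2])

def get_years_as_strings (start_year : Int) (end_year : Int) (wrap_n_elements_in_array : Int) : List (List String) :=
  if wrap_n_elements_in_array > 0 then
    let st := (PySem.List.enumerate (PySem.List.pyRange start_year (end_year + 1) 1) 0).foldl (pvStepA wrap_n_elements_in_array) ([], [])
    if 0 < st.2.length then st.1 ++ [st.2] else st.1
  else
    [(PySem.List.pyRange start_year (end_year + 1) 1).map (fun y => PySem.Int.toStr y)]

-- ===== PORT B =====
def get_years_as_strings_alt (start_year : Int) (end_year : Int) (wrap_n_elements_in_array : Int) : List (List String) :=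
  let years := (PySem.List.pyRange start_year (end_year + 1) 1).map (fun y => PySem.Int.toStr y)
  if wrap_n_elements_in_array ≤ 0 then [years]
  else
    (PySem.List.pyRange 0 (years.length : Int) wrap_n_elements_in_array).map
      (fun i => PySem.List.slice years (some i) (some (i + wrap_n_elements_in_array)))

-- ===== PRECONDITION & SPEC =====
def Spec_get_years_as_strings (start_year : Int) (end_year : Int) (wrap_n_elements_in_array : Int) (out : List (List String)) : Prop := out = get_years_as_strings_alt start_year end_year wrap_n_elements_in_array
instance (start_year : Int) (end_year : Int) (wrap_n_elements_in_array : Int) (out : List (List String)) : Decidable (Spec_get_years_as_strings start_year end_year wrap_n_elements_in_array out) := by unfold Spec_get_years_as_strings; infer_instance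

-- ===== CLAIM (what is proved, stated in full; the proofs are below) =====
def Claim_equal_get_years_as_strings : Prop := ∀ (start_year : Int) (end_year : Int) (wrap_n_elements_in_array : Int), Dom_get_years_as_strings start_year end_year wrap_n_elements_in_array → Spec_get_years_as_strings start_year end_year wrap_n_elements_in_array (get_years_as_strings start_year end_year wrap_n_elements_in_array)

-- ===== LEMMAS AND PROOFS =====

-- reference chunking: take-w/drop-w partition of a list
def chunkTD (w : Nat) : List String → List (List String)
  | [] => []
  | x :: xs => (x :: xs.take (w - 1)) :: chunkTD w (xs.drop (w - 1))
  termination_by L => L.length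
  decreasing_by simp only [List.length_drop, List.length_cons]; omega

lemma chunkTD_nil (w : Nat) : chunkTD w [] = [] := by simp [chunkTD]

lemma chunkTD_cons (w : Nat) (x : String) (xs : List String) :
    chunkTD w (x :: xs) = (x :: xs.take (w - 1)) :: chunkTD w (xs.drop (w - 1)) := by
  simp [chunkTD]

-- A's accumulator loop, re-expressed without the enumerate index
def chunkAux (w : Nat) (tmp : List String) : List String → List (List String)
  | [] => if tmp.isEmpty then [] else [tmp]
  | x :: xs => if tmp.length = w then tmp :: chunkAux w [x] xs else chunkAux w (tmp ++ [x]) xs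

lemma pyRange_pos_nil {a b s : Int} (hs : 0 < s) (h : b ≤ a) : PySem.List.pyRange a b s = [] := by
  rw [PySem.List.pyRange_of_pos a b hs]
  simp [if_neg (by omega : ¬ a < b)]

lemma pyRange_pos_cons {a b s : Int} (hs : 0 < s) (h : a < b) :
    PySem.List.pyRange a b s = a :: PySem.List.pyRange (a + s) b s := by
  rw [PySem.List.pyRange_of_pos a b hs, PySem.List.pyRange_of_pos (a + s) b hs]
  have hcount : ((b - a + s - 1) / s).toNat
      = (if a + s < b then ((b - (a + s) + s - 1) / s).toNat else 0) + 1 := by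
    have h1 : b - a + s - 1 = (b - a - 1) + 1 * s := by ring
    have h2 : (b - a + s - 1) / s = (b - a - 1) / s + 1 := by
      rw [h1, Int.add_mul_ediv_right _ _ (by omega : s ≠ 0)]
    by_cases hb : a + s < b
    · rw [if_pos hb, h2]
      have h3 : b - (a + s) + s - 1 = b - a - 1 := by ring
      rw [h3]
      have hnn : 0 ≤ (b - a - 1) / s := Int.ediv_nonneg (by omega) (by omega)
      omega
    · rw [if_neg hb, h2]
      have h4 : (b - a - 1) / s = 0 := Int.ediv_eq_zero_of_lt (by omega) (by omega)
      omega
  rw [if_pos h, hcount, List.range_succ_eq_map, List.map_cons, List.map_map]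
  simp only [Nat.cast_zero, mul_zero, add_zero]
  congr 1
  apply List.map_congr_left
  intro k _
  simp only [Function.comp_apply, Nat.succ_eq_add_one]
  push_cast
  ring

-- B's slice comprehension computes chunkTD
lemma sliceMap_eq_chunkTD (w : Int) (hw : 0 < w) :
    ∀ (n : Nat) (full L : List String) (a : Int), 0 ≤ a → full.drop a.toNat = L → L.length ≤ n →
    (PySem.List.pyRange a (full.length : Int) w).map
        (fun i => PySem.List.slice full (some i) (some (i + w))) = chunkTD w.toNat L := by
  intro n
  induction n with
  | zero =>
    intro full L a ha hdrop hlen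
    have hL : L = [] := by
      cases L with
      | nil => rfl
      | cons x xs => simp at hlen
    subst hL
    have hge : (full.length : Int) ≤ a := by
      have h := congrArg List.length hdrop
      simp only [List.length_drop, List.length_nil] at h
      omega
    rw [pyRange_pos_nil hw hge, chunkTD_nil]
    simp
  | succ n ih =>
    intro full L a ha hdrop hlen
    cases L with
    | nil =>
      have hge : (full.length : Int) ≤ a := by
        have h := congrArg List.length hdrop
        simp only [List.length_drop, List.length_nil] at h
        omega
      rw [pyRange_pos_nil hw hge, chunkTD_nil]
      simp
    | cons x xs =>
      have hlen' : (full.drop a.toNat).length = xs.length + 1 := by rw [hdrop]; simp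
      simp only [List.length_drop] at hlen'
      have hlt : a < (full.length : Int) := by omega
      rw [pyRange_pos_cons hw hlt, List.map_cons]
      have hhead : PySem.List.slice full (some a) (some (a + w)) = (x :: xs).take w.toNat := by
        rw [PySem.List.slice_toNat full ha (by omega)]
        have h5 : (a + w).toNat - a.toNat = w.toNat := by omega
        rw [h5, hdrop]
      have htail : full.drop (a + w).toNat = xs.drop (w.toNat - 1) := by
        have h6 : (a + w).toNat = a.toNat + w.toNat := by omega
        rw [h6, ← List.drop_drop, hdrop]
        cases h : w.toNat with
        | zero => omega
        | succ m => simp [List.drop_succ_cons]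
      have hlen'' : (xs.drop (w.toNat - 1)).length ≤ n := by
        simp only [List.length_drop]
        simp only [List.length_cons] at hlen
        omega
      rw [ih full (xs.drop (w.toNat - 1)) (a + w) (by omega) htail hlen'']
      rw [chunkTD_cons, hhead]
      have hw1 : w.toNat = (w.toNat - 1) + 1 := by omega
      rw [hw1]
      simp [List.take_succ_cons]

-- A's fold with the enumerate index equals chunkAux (invariant: tmp.length tracks idx mod w)
lemma foldA_eq_chunkAux (w : Int) (hw : 0 < w) :
    ∀ (L : List Int) (res : List (List String)) (tmp : List String) (idx : Int), 0 ≤ idx →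
    ((tmp.length = w.toNat ∧ PySem.Int.mod idx w = 0) ∨
      ((tmp.length : Int) = PySem.Int.mod idx w ∧ (tmp.length : Int) < w)) →
    (let st := (PySem.List.enumerate L idx).foldl (pvStepA w) (res, tmp);
      if 0 < st.2.length then st.1 ++ [st.2] else st.1)
      = res ++ chunkAux w.toNat tmp (L.map (fun y => PySem.Int.toStr y)) := by
  intro L
  induction L with
  | nil =>
    intro res tmp idx _ _
    rw [PySem.List.enumerate_nil]
    simp only [List.foldl_nil, List.map_nil, chunkAux]
    cases tmp with
    | nil => simp
    | cons t ts => simp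
  | cons x xs ih =>
    intro res tmp idx hidx hinv
    have hmod : PySem.Int.mod idx w = idx % w := by
      rw [PySem.Int.mod, Int.fmod_eq_emod]
      simp [le_of_lt hw]
    have hmlt : idx % w < w := Int.emod_lt_of_pos idx hw
    have hmnn : 0 ≤ idx % w := Int.emod_nonneg idx (by omega)
    have hmod1 : PySem.Int.mod (idx + 1) w = (idx + 1) % w := by
      rw [PySem.Int.mod, Int.fmod_eq_emod]
      simp [le_of_lt hw]
    have hstepmod : (idx + 1) % w = (idx % w + 1) % w := by
      conv_rhs => rw [Int.add_emod, Int.emod_emod_of_dvd _ (dvd_refl w)]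
      rw [Int.add_emod]
    rw [PySem.List.enumerate_cons, List.foldl_cons, List.map_cons]
    rcases hinv with ⟨hlen, hz⟩ | ⟨hlen, hlt⟩
    · -- tmp is full and idx ≡ 0 (mod w): flush, start a new chunk with x
      have hcond : PySem.Int.mod idx w = 0 ∧ 0 < tmp.length := ⟨hz, by omega⟩
      have hstep : pvStepA w (res, tmp) (idx, x) = (res ++ [tmp], [PySem.Int.toStr x]) := by
        simp [pvStepA, hcond]
      rw [hstep]
      have hinv' : (([PySem.Int.toStr x] : List String).length = w.toNat ∧ PySem.Int.mod (idx + 1) w = 0) ∨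
          ((([PySem.Int.toStr x] : List String).length : Int) = PySem.Int.mod (idx + 1) w ∧
            (([PySem.Int.toStr x] : List String).length : Int) < w) := by
        rw [hmod] at hz
        by_cases hw1 : w = 1
        · exact Or.inl ⟨by simp [hw1], by rw [hmod1, hw1]; simp⟩
        · refine Or.inr ⟨?_, by simp; omega⟩
          simp only [List.length_cons, List.length_nil]
          rw [hmod1, hstepmod, hz, Int.emod_eq_of_lt (by omega) (by omega)]
          simp
      rw [ih (res ++ [tmp]) [PySem.Int.toStr x] (idx + 1) (by omega) hinv']
      rw [chunkAux, if_pos hlen]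
      simp
    · -- tmp not full: x joins the current chunk
      rw [hmod] at hlen
      have hcond : ¬ (PySem.Int.mod idx w = 0 ∧ 0 < tmp.length) := by
        rintro ⟨h0, hpos⟩
        rw [hmod] at h0
        rw [h0] at hlen
        omega
      have hstep : pvStepA w (res, tmp) (idx, x) = (res, tmp ++ [PySem.Int.toStr x]) := by
        simp only [pvStepA, if_neg hcond]
      rw [hstep]
      have hinv' : ((tmp ++ [PySem.Int.toStr x]).length = w.toNat ∧ PySem.Int.mod (idx + 1) w = 0) ∨
          (((tmp ++ [PySem.Int.toStr x]).length : Int) = PySem.Int.mod (idx + 1) w ∧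
            ((tmp ++ [PySem.Int.toStr x]).length : Int) < w) := by
        by_cases hfull : (tmp.length : Int) + 1 = w
        · refine Or.inl ⟨by simp; omega, ?_⟩
          rw [hmod1, hstepmod, ← hlen, hfull]
          simp
        · refine Or.inr ⟨?_, by simp; omega⟩
          rw [hmod1, hstepmod, ← hlen, Int.emod_eq_of_lt (by omega) (by omega)]
          simp
      rw [ih res (tmp ++ [PySem.Int.toStr x]) (idx + 1) (by omega) hinv']
      rw [chunkAux, if_neg (by omega : ¬ tmp.length = w.toNat)]

-- chunkAux started mid-chunk, related to chunkTD
lemma chunkAux_eq (w : Nat) (hw : 0 < w) :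
    ∀ (L tmp : List String), tmp.length ≤ w →
    chunkAux w tmp L = if tmp = [] then chunkTD w L
      else (tmp ++ L.take (w - tmp.length)) :: chunkTD w (L.drop (w - tmp.length)) := by
  intro L
  induction L with
  | nil =>
    intro tmp htmp
    rw [chunkAux]
    cases tmp with
    | nil => simp [chunkTD_nil]
    | cons t ts => simp [chunkTD_nil]
  | cons x xs ih =>
    intro tmp htmp
    rw [chunkAux]
    cases tmp with
    | nil =>
      simp only [List.length_nil, List.nil_append]
      rw [if_neg (by omega : ¬ (0 = w)), ih [x] (by simp; omega)]
      simp [chunkTD_cons]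
    | cons t ts =>
      by_cases hfull : (t :: ts).length = w
      · rw [if_pos hfull, ih [x] (by simp; omega)]
        simp [hfull, chunkTD_cons]
      · rw [if_neg hfull, ih ((t :: ts) ++ [x]) (by simp at hfull htmp ⊢; omega)]
        rw [if_neg (by simp)]
        have hr : (t :: ts).length < w := by omega
        have h1 : w - ((t :: ts) ++ [x]).length = w - (t :: ts).length - 1 := by simp; omega
        have h2 : w - (t :: ts).length = (w - (t :: ts).length - 1) + 1 := by omega
        rw [h1, h2]
        simp [List.take_succ_cons, List.drop_succ_cons]

-- ===== VERDICT (by name: the statement is the Claim_ definition above) =====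
theorem get_years_as_strings_spec : Claim_equal_get_years_as_strings := by
  intro s e w _
  unfold Spec_get_years_as_strings get_years_as_strings get_years_as_strings_alt
  by_cases hw : 0 < w
  · rw [if_pos hw, if_neg (by omega : ¬ w ≤ 0)]
    have hA := foldA_eq_chunkAux w hw (PySem.List.pyRange s (e + 1) 1) [] [] 0 le_rfl
      (Or.inr (by simp [PySem.Int.mod, Int.zero_fmod]; omega))
    simp only [List.nil_append] at hA
    rw [hA]
    set L : List String := (PySem.List.pyRange s (e + 1) 1).map (fun y => PySem.Int.toStr y) with hL
    have hB := sliceMap_eq_chunkTD w hw L.length L L 0 le_rfl (by simp) le_rfl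
    rw [hB]
    rw [chunkAux_eq w.toNat (by omega) L [] (by simp)]
    simp
  · rw [if_neg hw, if_pos (by omega : w ≤ 0)]
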